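-- pv_equiv track=rewrite | github.com/pypi-data/pypi-mirror-167 | packages/mybar/mybar-0.2.tar.gz/mybar-0.2/mybar/parser.py | make_dct
-- ===== SOURCE A (Python) =====
-- switch = [
--     ('mins', 'secs', 60),
--     ('hours', 'mins', 60),
--     ('days', 'hours', 24),
--     ('weeks', 'days', 7),
-- ]
--
-- keys = [
--     'secs',
--     'mins',
--     'hours',
--     'days',
--     'weeks',
-- ]
--
-- def make_dct(n, fields):
--     d = {'secs': n}
--     indexes = tuple(keys.index(f) for f in fields)
--     granularity = keys[min(indexes)]
--
--     reps = max(indexes)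
--     for i in range(reps):
--         fname, prev, mod = switch[i]
--         d[fname], d[prev] = divmod(d[prev], mod)
--     return d
-- ===== SOURCE B (Python) =====
-- switch = [
--     ('mins', 'secs', 60),
--     ('hours', 'mins', 60),
--     ('days', 'hours', 24),
--     ('weeks', 'days', 7),
-- ]
--
-- keys = [
--     'secs',
--     'mins',
--     'hours',
--     'days',
--     'weeks',
-- ]
--
-- def make_dct(n, fields):
--     reps = max(keys.index(f) for f in fields)
--     d = {'secs': n}
--     P = 1
--     for i in range(reps):
--         _, unit, mod = switch[i]
--         d[unit] = (n // P) % mod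
--         P *= mod
--     if reps:
--         d[switch[reps - 1][0]] = n // P
--     return d
-- ===== Notes on version B (the rewrite author's own statement) =====
-- stated objective: alternative
-- what changed: Replaces the chained divmod that threads a running quotient through the dict with independent closed-form values: each unit is (n // P) % mod for a cumulative product P of moduli, and the top unit is n // P set once at the end.
import Mathlib
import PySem

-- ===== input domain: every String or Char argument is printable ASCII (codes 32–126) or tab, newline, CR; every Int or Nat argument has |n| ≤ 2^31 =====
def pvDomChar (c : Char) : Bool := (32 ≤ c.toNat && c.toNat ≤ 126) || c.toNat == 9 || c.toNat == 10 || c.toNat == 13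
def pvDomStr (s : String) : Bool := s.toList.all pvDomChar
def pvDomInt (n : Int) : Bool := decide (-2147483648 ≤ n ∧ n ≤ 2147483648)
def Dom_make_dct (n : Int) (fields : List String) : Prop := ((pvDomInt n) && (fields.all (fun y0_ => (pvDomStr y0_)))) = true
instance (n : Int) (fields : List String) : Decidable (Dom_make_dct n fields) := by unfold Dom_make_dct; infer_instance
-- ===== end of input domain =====

-- B replaces A's chained divmod (running quotient threaded through the dict) by independent
-- closed-form values (n // P) % mod with a cumulative product P of moduli; same return value.

def switchL : List (String × String × Int) :=
  [("mins", "secs", 60), ("hours", "mins", 60), ("days", "hours", 24), ("weeks", "days", 7)]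

def keysL : List String := ["secs", "mins", "hours", "days", "weeks"]

-- ===== PORT A =====
-- indexes/reps: keys.index raises ValueError for an unknown field and max() raises on an empty
-- tuple; those inputs are excluded by Pre_ below, so .getD 0 / foldl max 0 are only reached
-- where they agree with Python. The unused 'granularity' line is pure and is kept as a dead let.
def make_dct (n : Int) (fields : List String) : List (String × Int) :=
  let d : PySem.Dict String Int := PySem.Dict.insert PySem.Dict.empty "secs" n
  let indexes : List Nat := fields.map (fun f => (PySem.List.index? keysL f).getD 0)
  let _granularity := PySem.List.pyGet? keysL ((indexes.foldl min 4 : Nat) : Int)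
  let reps : Nat := indexes.foldl max 0
  ((List.range reps).foldl (fun d i =>
    match switchL[i]? with
    | some (fname, prev, m) =>
      let p := PySem.Dict.getD d prev 0
      PySem.Dict.insert (PySem.Dict.insert d fname (PySem.Int.floordiv p m)) prev (PySem.Int.mod p m)
    | none => d) d).items

-- ===== PORT B =====
def make_dct_alt (n : Int) (fields : List String) : List (String × Int) :=
  let reps : Nat := (fields.map (fun f => (PySem.List.index? keysL f).getD 0)).foldl max 0
  let dP := (List.range reps).foldl (fun (dP : PySem.Dict String Int × Int) i =>
    match switchL[i]? with
    | some (_, unit, m) =>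
      (PySem.Dict.insert dP.1 unit (PySem.Int.mod (PySem.Int.floordiv n dP.2) m), dP.2 * m)
    | none => dP) (PySem.Dict.insert PySem.Dict.empty "secs" n, 1)
  (if reps ≠ 0 then
    match switchL[reps - 1]? with
    | some (top, _, _) => PySem.Dict.insert dP.1 top (PySem.Int.floordiv n dP.2)
    | none => dP.1
  else dP.1).items

-- ===== PRECONDITION & SPEC =====
-- Pre_ excludes exactly the inputs where Python A raises ValueError: an empty fields list
-- (max() of an empty sequence) or a field not among the five unit keys (keys.index).
def Pre_make_dct (n : Int) (fields : List String) : Prop :=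
  fields ≠ [] ∧ ∀ f ∈ fields, f ∈ keysL
instance (n : Int) (fields : List String) : Decidable (Pre_make_dct n fields) := by
  unfold Pre_make_dct; infer_instance

def pvWitness_make_dct : Int × List String := (3725, ["hours", "secs"])

def Spec_make_dct (n : Int) (fields : List String) (out : List (String × Int)) : Prop :=
  out = make_dct_alt n fields
instance (n : Int) (fields : List String) (out : List (String × Int)) :
    Decidable (Spec_make_dct n fields out) := by unfold Spec_make_dct; infer_instance

-- ===== CLAIM (what is proved, stated in full; the proofs are below) =====
def Claim_equal_make_dct : Prop := ∀ (n : Int) (fields : List String),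
  Dom_make_dct n fields → Pre_make_dct n fields → Spec_make_dct n fields (make_dct n fields)

-- ===== LEMMAS AND PROOFS =====

-- proof-only helpers: each port's loop as a function of n and the common reps value
def repsOf (fields : List String) : Nat :=
  (fields.map (fun f => (PySem.List.index? keysL f).getD 0)).foldl max 0

def acore (n : Int) (r : Nat) : List (String × Int) :=
  ((List.range r).foldl (fun d i =>
    match switchL[i]? with
    | some (fname, prev, m) =>
      let p := PySem.Dict.getD d prev 0
      PySem.Dict.insert (PySem.Dict.insert d fname (PySem.Int.floordiv p m)) prev (PySem.Int.mod p m)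
    | none => d) (PySem.Dict.insert PySem.Dict.empty "secs" n)).items

def bcore (n : Int) (r : Nat) : List (String × Int) :=
  (let dP := (List.range r).foldl (fun (dP : PySem.Dict String Int × Int) i =>
    match switchL[i]? with
    | some (_, unit, m) =>
      (PySem.Dict.insert dP.1 unit (PySem.Int.mod (PySem.Int.floordiv n dP.2) m), dP.2 * m)
    | none => dP) (PySem.Dict.insert PySem.Dict.empty "secs" n, 1)
  if r ≠ 0 then
    match switchL[r - 1]? with
    | some (top, _, _) => PySem.Dict.insert dP.1 top (PySem.Int.floordiv n dP.2)
    | none => dP.1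
  else dP.1).items

theorem make_dct_eq_acore (n : Int) (fields : List String) :
    make_dct n fields = acore n (repsOf fields) := rfl

theorem make_dct_alt_eq_bcore (n : Int) (fields : List String) :
    make_dct_alt n fields = bcore n (repsOf fields) := rfl

theorem index_keysL_le {f : String} (h : f ∈ keysL) :
    (PySem.List.index? keysL f).getD 0 ≤ 4 := by
  fin_cases h <;> decide

theorem foldl_max_le (l : List Nat) (m : Nat) (hm : m ≤ 4) (h : ∀ x ∈ l, x ≤ 4) :
    l.foldl max m ≤ 4 := by
  induction l generalizing m with
  | nil => simpa using hm
  | cons x xs ih =>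
    exact ih (max m x) (by have := h x (by simp); omega) (fun y hy => h y (by simp [hy]))

theorem repsOf_le (fields : List String) (h : ∀ f ∈ fields, f ∈ keysL) :
    repsOf fields ≤ 4 :=
  foldl_max_le _ 0 (by omega) (by
    intro x hx
    obtain ⟨f, hf, rfl⟩ := List.mem_map.mp hx
    exact index_keysL_le (h f hf))

theorem core_eq (n : Int) (r : Nat) (hr : r ≤ 4) : acore n r = bcore n r := by
  interval_cases r <;>
    simp [acore, bcore, List.range_succ, PySem.Dict.insert, PySem.Dict.getD, PySem.Dict.get?,
      PySem.Dict.empty, switchL, Int.ediv_ediv_of_nonneg]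

-- ===== VERDICT (by name: the statement is the Claim_ definition above) =====
theorem make_dct_spec : Claim_equal_make_dct := by
  intro n fields _ hpre
  unfold Spec_make_dct
  rw [make_dct_eq_acore, make_dct_alt_eq_bcore]
  exact core_eq n _ (repsOf_le fields hpre.2)
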